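-- pv_equiv track=rewrite | github.com/eburi/ha_addon_scheiber | scheiber/src/tools/analyser.py | diff_mask
-- ===== SOURCE A (Python) =====
-- CLR_RESET = "\033[0m"
--
-- CLR_YELLOW = "\033[93m"
--
-- def diff_mask(prev, curr, binary):
--     if prev is None:
--         return ""
--
--     if binary:
--         mask_parts = []
--         for a, b in zip(prev, curr):
--             if a != b:
--                 bits_prev = f"{a:08b}"
--                 bits_current = f"{b:08b}"
--                 mask_parts.append(f"{CLR_YELLOW}")
--                 for prev_bit, curr_bit in zip(bits_prev, bits_current):
--                     mask_parts.append("^" if prev_bit != curr_bit else " ")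
--                 mask_parts.append(f"{CLR_RESET}")
--                 mask_parts.append(" ")  # Spacer
--             else:
--                 mask_parts.append("         ")
--         return "".join(mask_parts).rstrip()
--
--     else:
--         mask_parts = []
--         for a, b in zip(prev, curr):
--             if a != b:
--                 mask_parts.append(f"{CLR_YELLOW}^^ {CLR_RESET}")
--             else:
--                 mask_parts.append("   ")
--         return "".join(mask_parts).rstrip()
-- ===== SOURCE B (Python) =====
-- CLR_RESET = "\033[0m"
--
-- CLR_YELLOW = "\033[93m"
--
--
-- def _block(a, b, binary):
--     """The rendered block for one pair, including the trailing spacer."""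
--     if a == b:
--         return "         " if binary else "   "
--     return _last_block(a, b, binary) + (" " if binary else "")
--
--
-- def _last_block(a, b, binary):
--     """The rendered block for the last differing pair (no trailing spacer)."""
--     if not binary:
--         return CLR_YELLOW + "^^ " + CLR_RESET
--     mask = "".join("^" if x != y else " " for x, y in zip(f"{a:08b}", f"{b:08b}"))
--     return CLR_YELLOW + mask + CLR_RESET
--
--
-- def diff_mask(prev, curr, binary):
--     if prev is None:
--         return ""
--     pairs = list(zip(prev, curr))
--     # drop the trailing equal pairs: their blocks are pure spaces, gone after rstrip
--     while pairs and pairs[-1][0] == pairs[-1][1]: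
--         pairs.pop()
--     if not pairs:
--         return ""
--     *init, last = pairs
--     return "".join(_block(a, b, binary) for a, b in init) + _last_block(last[0], last[1], binary)
-- ===== Notes on version B (the rewrite author's own statement) =====
-- stated objective: alternative
-- what changed: Instead of accumulating character-level parts (with an inner per-bit append loop) and scanning the joined string backwards with rstrip(), B drops the trailing equal pairs from the pair list up front, renders each remaining pair as one block via a comprehension-built mask, and emits the last differing pair without its spacer, so no rstrip pass is needed.
import Mathlib
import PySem

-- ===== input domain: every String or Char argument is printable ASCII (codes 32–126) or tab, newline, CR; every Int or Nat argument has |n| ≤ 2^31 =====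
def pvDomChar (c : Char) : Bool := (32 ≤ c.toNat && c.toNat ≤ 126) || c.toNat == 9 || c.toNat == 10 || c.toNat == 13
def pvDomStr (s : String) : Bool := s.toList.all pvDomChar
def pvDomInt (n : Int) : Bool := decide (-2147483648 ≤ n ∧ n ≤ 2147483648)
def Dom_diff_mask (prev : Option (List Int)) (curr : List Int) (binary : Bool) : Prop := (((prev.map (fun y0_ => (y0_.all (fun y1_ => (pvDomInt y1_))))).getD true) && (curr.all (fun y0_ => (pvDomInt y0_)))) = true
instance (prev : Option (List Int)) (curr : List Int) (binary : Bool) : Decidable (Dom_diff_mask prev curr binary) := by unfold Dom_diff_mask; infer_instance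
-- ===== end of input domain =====

-- B rebuilds the same colored diff mask but, instead of joining all blocks and scanning back with
-- rstrip(), drops the trailing equal pairs up front and renders the last differing pair without its
-- spacer (objective: alternative decomposition, same cost).

-- ===== PORT A =====

-- "\033[93m" and "\033[0m" as code-point lists
def pyYellow : List Char := [Char.ofNat 27, '[', '9', '3', 'm']
def pyReset : List Char := [Char.ofNat 27, '[', '0', 'm']

-- f"{n:08b}": binary digits of |n| with a leading '-' for negatives, zero-filled to width 8
-- (the fill goes between the sign and the digits, exactly Python's str.zfill) — exact on all Int
def pyFormat08b (n : Int) : List Char :=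
  if n < 0 then PySem.Chars.zfill ('-' :: Nat.toDigits 2 n.natAbs) 8
  else PySem.Chars.zfill (Nat.toDigits 2 n.natAbs) 8

def diff_mask (prev : Option (List Int)) (curr : List Int) (binary : Bool) : String :=
  match prev with
  | none => ""
  | some p =>
    if binary then
      let mask_parts : List (List Char) := (p.zip curr).foldl (fun mask_parts ab =>
        if ab.1 ≠ ab.2 then
          let bits_prev := pyFormat08b ab.1
          let bits_current := pyFormat08b ab.2
          let mask_parts := mask_parts ++ [pyYellow]
          let mask_parts := (bits_prev.zip bits_current).foldl (fun mask_parts pc =>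
            mask_parts ++ [[if pc.1 ≠ pc.2 then '^' else ' ']]) mask_parts
          mask_parts ++ [pyReset] ++ [[' ']]   -- Spacer
        else
          mask_parts ++ [[' ',' ',' ',' ',' ',' ',' ',' ',' ']]) []
      String.mk (PySem.Chars.rstrip (PySem.Chars.join [] mask_parts))
    else
      let mask_parts : List (List Char) := (p.zip curr).foldl (fun mask_parts ab =>
        if ab.1 ≠ ab.2 then mask_parts ++ [pyYellow ++ ['^','^',' '] ++ pyReset]
        else mask_parts ++ [[' ',' ',' ']]) []
      String.mk (PySem.Chars.rstrip (PySem.Chars.join [] mask_parts))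

-- ===== PORT B =====

-- _last_block(a, b, binary): block for the last differing pair, no trailing spacer
def pyLastBlock (binary : Bool) (ab : Int × Int) : List Char :=
  if binary = false then pyYellow ++ ['^','^',' '] ++ pyReset
  else
    let mask := ((pyFormat08b ab.1).zip (pyFormat08b ab.2)).map
      (fun xy => if xy.1 ≠ xy.2 then '^' else ' ')
    pyYellow ++ mask ++ pyReset

-- _block(a, b, binary): block for a non-last pair, trailing spacer included
def pyBlock (binary : Bool) (ab : Int × Int) : List Char :=
  if ab.1 = ab.2 then (if binary then [' ',' ',' ',' ',' ',' ',' ',' ',' '] else [' ',' ',' '])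
  else pyLastBlock binary ab ++ (if binary then [' '] else [])

def diff_mask_alt (prev : Option (List Int)) (curr : List Int) (binary : Bool) : String :=
  match prev with
  | none => ""
  | some p =>
    -- while pairs and pairs[-1][0] == pairs[-1][1]: pairs.pop()
    let pairs := ((p.zip curr).reverse.dropWhile (fun ab => ab.1 == ab.2)).reverse
    match pairs.getLast? with
    | none => ""
    | some last =>
      String.mk ((pairs.dropLast.map (pyBlock binary)).flatten ++ pyLastBlock binary last)

-- ===== PRECONDITION & SPEC =====
def Spec_diff_mask (prev : Option (List Int)) (curr : List Int) (binary : Bool) (out : String) : Prop := out = diff_mask_alt prev curr binary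
instance (prev : Option (List Int)) (curr : List Int) (binary : Bool) (out : String) : Decidable (Spec_diff_mask prev curr binary out) := by unfold Spec_diff_mask; infer_instance

-- ===== CLAIM (what is proved, stated in full; the proofs are below) =====
def Claim_equal_diff_mask : Prop := ∀ (prev : Option (List Int)) (curr : List Int) (binary : Bool), Dom_diff_mask prev curr binary → Spec_diff_mask prev curr binary (diff_mask prev curr binary)

-- ===== LEMMAS AND PROOFS =====

-- "".join over List Char parts is flatten
theorem join_nil_eq_flatten (ps : List (List Char)) :
    PySem.Chars.join [] ps = ps.flatten := by
  induction ps with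
  | nil => rfl
  | cons h t ih =>
    cases t with
    | nil => simp [PySem.Chars.join, List.intercalate]
    | cons h' t' =>
      simp only [PySem.Chars.join, List.intercalate, List.intersperse] at ih ⊢
      simp_all

theorem rstrip_append_spaces (s t : List Char)
    (h : ∀ c ∈ t, PySem.Chars.isspace c = true) :
    PySem.Chars.rstrip (s ++ t) = PySem.Chars.rstrip s := by
  simp only [PySem.Chars.rstrip, List.reverse_append, List.dropWhile_append]
  have : t.reverse.dropWhile PySem.Chars.isspace = [] := by
    rw [List.dropWhile_eq_nil_iff]; intro c hc; exact h c (List.mem_reverse.mp hc)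
  simp [this]

theorem flatMap_singleton_eq_map {α β : Type} (f : α → β) (l : List α) :
    (l.flatMap (fun x => [f x])) = l.map f := by
  induction l <;> simp_all

theorem flatten_map_singleton {α β : Type} (f : α → β) (l : List α) :
    (l.map (fun x => [f x])).flatten = l.map f := by
  induction l <;> simp_all

theorem rstrip_append_getLast_nonspace (s t : List Char) (c : Char)
    (hl : t.getLast? = some c) (h : PySem.Chars.isspace c = false) :
    PySem.Chars.rstrip (s ++ t) = s ++ t := by
  obtain ⟨t', rfl⟩ : ∃ t', t = t' ++ [c] := by
    rcases List.eq_nil_or_concat t with rfl | ⟨t', d, rfl⟩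
    · simp at hl
    · simp at hl; exact ⟨t', by simp [hl]⟩
  simp [PySem.Chars.rstrip, h]

theorem getLast?_append_reset (s : List Char) : (s ++ pyReset).getLast? = some 'm' := by
  have h : s ++ pyReset = (s ++ [Char.ofNat 27, '[', '0']) ++ ['m'] := by simp [pyReset]
  rw [h, List.getLast?_concat]

theorem pyLastBlock_getLast? (b : Bool) (ab : Int × Int) :
    (pyLastBlock b ab).getLast? = some 'm' := by
  cases b
  · unfold pyLastBlock; rw [if_pos rfl]; exact getLast?_append_reset _
  · unfold pyLastBlock; rw [if_neg (by decide)]; exact getLast?_append_reset _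

-- A's binary outer loop appends, per pair, the part group gBin
def gBin (ab : Int × Int) : List (List Char) :=
  if ab.1 ≠ ab.2 then
    [pyYellow] ++ ((pyFormat08b ab.1).zip (pyFormat08b ab.2)).map
      (fun pc => [if pc.1 ≠ pc.2 then '^' else ' ']) ++ [pyReset] ++ [[' ']]
  else [[' ',' ',' ',' ',' ',' ',' ',' ',' ']]

theorem A_binary_parts (l : List (Int × Int)) (acc : List (List Char)) :
    (l.foldl (fun mask_parts ab =>
      if ab.1 ≠ ab.2 then
        let bits_prev := pyFormat08b ab.1
        let bits_current := pyFormat08b ab.2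
        let mask_parts := mask_parts ++ [pyYellow]
        let mask_parts := (bits_prev.zip bits_current).foldl (fun mask_parts pc =>
          mask_parts ++ [[if pc.1 ≠ pc.2 then '^' else ' ']]) mask_parts
        mask_parts ++ [pyReset] ++ [[' ']]
      else
        mask_parts ++ [[' ',' ',' ',' ',' ',' ',' ',' ',' ']]) acc)
    = acc ++ l.flatMap gBin := by
  induction l generalizing acc with
  | nil => simp
  | cons hd tl ih =>
    simp only [List.foldl_cons, List.flatMap_cons]
    rw [ih]
    by_cases h : hd.1 = hd.2
    · simp [h, gBin]
    · have hstep : ∀ acc2 : List (List Char),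
          (((pyFormat08b hd.1).zip (pyFormat08b hd.2)).foldl
            (fun mask_parts pc => mask_parts ++ [[if pc.1 ≠ pc.2 then '^' else ' ']]) acc2)
            = acc2 ++ ((pyFormat08b hd.1).zip (pyFormat08b hd.2)).map
                (fun pc => [if pc.1 ≠ pc.2 then '^' else ' ']) := by
        intro acc2
        rw [PySem.List.foldl_append_eq_flatMap, flatMap_singleton_eq_map]
      simp only [h, ne_eq, not_false_eq_true, if_pos, hstep, gBin]
      simp

theorem gBin_flatten (ab : Int × Int) : (gBin ab).flatten = pyBlock true ab := by
  by_cases h : ab.1 = ab.2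
  · simp [gBin, pyBlock, h]
  · simp only [gBin, pyBlock, pyLastBlock, h, ne_eq, not_false_eq_true, if_pos,
      Bool.true_eq_false, List.flatten_append, List.flatten_cons, flatten_map_singleton]
    simp

def gLin (ab : Int × Int) : List (List Char) :=
  if ab.1 ≠ ab.2 then [pyYellow ++ ['^','^',' '] ++ pyReset] else [[' ',' ',' ']]

theorem A_linear_parts (l : List (Int × Int)) (acc : List (List Char)) :
    (l.foldl (fun mask_parts ab =>
      if ab.1 ≠ ab.2 then mask_parts ++ [pyYellow ++ ['^','^',' '] ++ pyReset]
      else mask_parts ++ [[' ',' ',' ']]) acc) = acc ++ l.flatMap gLin := by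
  induction l generalizing acc with
  | nil => simp
  | cons hd tl ih =>
    simp only [List.foldl_cons, List.flatMap_cons]
    rw [ih]
    by_cases h : hd.1 = hd.2 <;> simp [h, gLin]

theorem gLin_flatten (ab : Int × Int) : (gLin ab).flatten = pyBlock false ab := by
  by_cases h : ab.1 = ab.2 <;> simp [gLin, pyBlock, pyLastBlock, h]

theorem flatten_flatMap_blocks (g : Int × Int → List (List Char)) (b : Bool)
    (hg : ∀ ab, (g ab).flatten = pyBlock b ab) (l : List (Int × Int)) :
    (l.flatMap g).flatten = (l.map (pyBlock b)).flatten := by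
  induction l with
  | nil => rfl
  | cons hd tl ih => simp [List.flatMap_cons, ih, hg]

theorem pyBlock_eq_spaces (b : Bool) (ab : Int × Int) (h : ab.1 = ab.2) :
    ∀ c ∈ pyBlock b ab, PySem.Chars.isspace c = true := by
  intro c hc
  simp only [pyBlock, h, if_pos] at hc
  cases b <;> simp_all <;> rcases hc with rfl | rfl | rfl <;> decide

-- the core fact: rstrip of the joined blocks = drop trailing equal pairs, last block unspaced
theorem rstrip_blocks (b : Bool) (l : List (Int × Int)) :
    PySem.Chars.rstrip ((l.map (pyBlock b)).flatten) =
      (match ((l.reverse.dropWhile (fun ab => ab.1 == ab.2)).reverse).getLast? with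
       | none => []
       | some last =>
         (((l.reverse.dropWhile (fun ab => ab.1 == ab.2)).reverse).dropLast.map
            (pyBlock b)).flatten ++ pyLastBlock b last) := by
  induction l using List.reverseRecOn with
  | nil => simp [PySem.Chars.rstrip]
  | append_singleton M p ih =>
    by_cases h : p.1 = p.2
    · have hdrop : ((M ++ [p]).reverse.dropWhile (fun ab => ab.1 == ab.2))
          = (M.reverse.dropWhile (fun ab => ab.1 == ab.2)) := by
        simp [h]
      rw [hdrop] at *
      have hl : ((M ++ [p]).map (pyBlock b)).flatten
          = (M.map (pyBlock b)).flatten ++ pyBlock b p := by simp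
      rw [hl, rstrip_append_spaces _ _ (pyBlock_eq_spaces b p h), ih]
    · have hdrop : ((M ++ [p]).reverse.dropWhile (fun ab => ab.1 == ab.2))
          = p :: M.reverse := by
        simp [h]
      rw [hdrop]
      have hpairs : (p :: M.reverse).reverse = M ++ [p] := by simp
      rw [hpairs]
      have hlast : (M ++ [p]).getLast? = some p := by simp
      have hdl : (M ++ [p]).dropLast = M := by simp
      rw [hlast, hdl]
      have hb : pyBlock b p = pyLastBlock b p ++ (if b then [' '] else []) := by
        simp [pyBlock, h]
      have hl : ((M ++ [p]).map (pyBlock b)).flatten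
          = ((M.map (pyBlock b)).flatten ++ pyLastBlock b p) ++ (if b then [' '] else []) := by
        simp [hb]
      rw [hl, rstrip_append_spaces, rstrip_append_getLast_nonspace _ _ 'm'
        (pyLastBlock_getLast? b p) (by decide)]
      intro c hc
      cases b <;> simp_all
      rcases hc with rfl; decide

-- ===== VERDICT (by name: the statement is the Claim_ definition above) =====
theorem diff_mask_spec : Claim_equal_diff_mask := by
  intro prev curr binary _
  unfold Spec_diff_mask
  cases prev with
  | none => rfl
  | some p =>
    cases binary with
    | false =>
      show String.mk _ = _
      rw [A_linear_parts, List.nil_append, join_nil_eq_flatten,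
        flatten_flatMap_blocks gLin false gLin_flatten, rstrip_blocks]
      simp only [diff_mask_alt]
      cases ((p.zip curr).reverse.dropWhile (fun ab => ab.1 == ab.2)).reverse.getLast? <;> rfl
    | true =>
      show String.mk _ = _
      rw [A_binary_parts, List.nil_append, join_nil_eq_flatten,
        flatten_flatMap_blocks gBin true gBin_flatten, rstrip_blocks]
      simp only [diff_mask_alt]
      cases ((p.zip curr).reverse.dropWhile (fun ab => ab.1 == ab.2)).reverse.getLast? <;> rfl
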